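-- pv_equiv track=rewrite | github.com/ai4smlab/Multi-Vehicle-Routing | backend/file_handler/vrplib_loader.py | _parse_depot_section
-- ===== SOURCE A (Python) =====
-- from typing import Dict, List, Optional, Tuple
--
-- def _parse_depot_section(lines: List[str]) -> List[int]:
--     depots: List[int] = []
--     for ln in lines:
--         ln = ln.strip()
--         if ln == "-1":
--             break
--         if ln and ln.lstrip("+-").isdigit():
--             depots.append(int(ln))
--     return depots
-- ===== SOURCE B (Python) =====
-- from typing import List
--
-- def _parse_depot_section(lines: List[str]) -> List[int]:
--     stripped = [ln.strip() for ln in lines]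
--     head = stripped[:stripped.index("-1")] if "-1" in stripped else stripped
--     return [int(s) for s in head if s and s.lstrip("+-").isdigit()]
-- ===== Notes on version B (the rewrite author's own statement) =====
-- stated objective: simpler
-- what changed: Replaces the fused loop-with-break by a two-stage pipeline: strip all lines, truncate at the first '-1' sentinel via index/slice, then one comprehension keeping the integer-like lines.
import Mathlib
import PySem

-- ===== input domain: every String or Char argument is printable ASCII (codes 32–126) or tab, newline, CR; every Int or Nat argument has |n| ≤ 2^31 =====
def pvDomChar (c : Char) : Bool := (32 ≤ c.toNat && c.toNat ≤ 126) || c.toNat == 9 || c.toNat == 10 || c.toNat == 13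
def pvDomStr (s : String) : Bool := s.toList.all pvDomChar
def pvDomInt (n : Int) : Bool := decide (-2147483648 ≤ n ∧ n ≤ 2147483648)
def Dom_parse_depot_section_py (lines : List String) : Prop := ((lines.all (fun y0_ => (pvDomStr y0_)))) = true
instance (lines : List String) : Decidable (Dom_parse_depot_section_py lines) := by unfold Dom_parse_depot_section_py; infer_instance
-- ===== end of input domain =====

-- B rebuilds A's fused loop-with-break as a two-stage pipeline (strip+truncate at the '-1' sentinel, then one comprehension); same return value, no speed claim.

-- shared helper: Python's s.lstrip("+-"), ported by hand (exact: drops the leading '+'/'-' characters)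
def pvLstripPM (s : String) : String := String.ofList (s.toList.dropWhile (fun c => c == '+' || c == '-'))

-- the filter test 'ln and ln.lstrip("+-").isdigit()' both Pythons use
def pvIntLike (t : String) : Bool := (t != "") && PySem.Str.strIsdigit (pvLstripPM t)

-- ===== PORT A =====
def parse_depot_section_py (lines : List String) : List Int :=
  match lines with
  | [] => []
  | ln :: rest =>
    let t := PySem.Str.strip ln
    if t = "-1" then []
    else if pvIntLike t then
      (PySem.Int.ofStr? t).getD 0 :: parse_depot_section_py rest   -- int(t); none (ValueError) is excluded by Pre_
    else parse_depot_section_py rest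

-- ===== PORT B =====
def parse_depot_section_py_alt (lines : List String) : List Int :=
  let stripped := lines.map PySem.Str.strip
  let head := if stripped.contains "-1"
              then stripped.take ((PySem.List.index? stripped "-1").getD 0)   -- stripped[:stripped.index("-1")]
              else stripped
  (head.filter pvIntLike).map (fun t => (PySem.Int.ofStr? t).getD 0)          -- int(s); none (ValueError) is excluded by Pre_

-- ===== PRECONDITION & SPEC =====
-- Pre_ excludes exactly the inputs where both Pythons raise ValueError: a line before the '-1'
-- sentinel whose stripped form passes the lstrip('+-').isdigit() test but is rejected by int()
-- (more than one leading sign, e.g. '+-5').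
def Pre_parse_depot_section_py (lines : List String) : Prop :=
  ∀ t ∈ (lines.map PySem.Str.strip).takeWhile (fun t => t != "-1"),
    pvIntLike t = true → (PySem.Int.ofStr? t).isSome
instance (lines : List String) : Decidable (Pre_parse_depot_section_py lines) := by unfold Pre_parse_depot_section_py; infer_instance
def pvWitness_parse_depot_section_py : List String := ["1", " +2\t", "", "abc", "-1", "x"]

def Spec_parse_depot_section_py (lines : List String) (out : List Int) : Prop := out = parse_depot_section_py_alt lines
instance (lines : List String) (out : List Int) : Decidable (Spec_parse_depot_section_py lines out) := by unfold Spec_parse_depot_section_py; infer_instance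

-- ===== CLAIM (what is proved, stated in full; the proofs are below) =====
def Claim_equal_parse_depot_section_py : Prop := ∀ (lines : List String), Dom_parse_depot_section_py lines → Pre_parse_depot_section_py lines → Spec_parse_depot_section_py lines (parse_depot_section_py lines)

-- ===== LEMMAS AND PROOFS =====

-- B's truncation (index/slice guarded by membership) is takeWhile (· ≠ "-1")
lemma take_index_eq_takeWhile (l : List String) :
    (if l.contains "-1" then l.take ((PySem.List.index? l "-1").getD 0) else l)
      = l.takeWhile (fun t => t != "-1") := by
  induction l with
  | nil => simp
  | cons a t ih =>
    by_cases ha : a = "-1"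
    · subst ha
      rw [PySem.List.index?_cons_self]
      simp
    · rw [PySem.List.index?_cons_of_ne t ha]
      by_cases hm : "-1" ∈ t
      · obtain ⟨i, hi⟩ := Option.isSome_iff_exists.mp ((PySem.List.index?_isSome_iff t "-1").mpr hm)
        have h1 := ih
        rw [if_pos (by simpa using hm), hi] at h1
        rw [if_pos (by simp [hm]), hi]
        simp only [Option.map_some, Option.getD_some, List.take_succ_cons]
        rw [List.takeWhile_cons_of_pos (by simpa using ha)]
        simpa using h1
      · have hnm : PySem.List.index? t "-1" = none := (PySem.List.index?_eq_none_iff t "-1").mpr hm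
        have h1 := ih
        rw [if_neg (by simpa using hm)] at h1
        rw [if_neg (by simp [hm]; exact fun h => ha h.symm)]
        rw [List.takeWhile_cons_of_pos (by simpa using ha)]
        exact congrArg (a :: ·) h1

-- A's loop is filter+map over the takeWhile-truncated stripped lines
lemma parseA_eq_pipeline (lines : List String) :
    parse_depot_section_py lines
      = (((lines.map PySem.Str.strip).takeWhile (fun t => t != "-1")).filter pvIntLike).map
          (fun t => (PySem.Int.ofStr? t).getD 0) := by
  induction lines with
  | nil => simp [parse_depot_section_py]
  | cons ln rest ih =>
    simp only [parse_depot_section_py, List.map_cons, List.takeWhile_cons]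
    by_cases h1 : PySem.Str.strip ln = "-1"
    · simp [h1]
    · have h1' : (PySem.Str.strip ln != "-1") = true := by simpa using h1
      rw [if_neg h1]
      simp only [h1', if_true]
      by_cases h2 : pvIntLike (PySem.Str.strip ln) = true
      · simp [h2, ih]
      · simp only [h2]
        rw [List.filter_cons_of_neg (by simpa using h2)]
        exact ih

-- ===== VERDICT (by name: the statement is the Claim_ definition above) =====
theorem parse_depot_section_py_spec : Claim_equal_parse_depot_section_py := by
  intro lines _ _
  unfold Spec_parse_depot_section_py parse_depot_section_py_alt
  rw [parseA_eq_pipeline]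
  simp only [take_index_eq_takeWhile]
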